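-- pv_equiv track=rewrite | github.com/felipeneira/Estupideces | WALS.py | distribucion
-- ===== SOURCE A (Python) =====
-- from collections import Counter
--
-- def distribucion(D):
--
--     D_rasgos = {lengua:{} for lengua in D.keys()}
--     for lengua in D.keys():
--         for lengualengua in D.keys():
--             features=list(D.values())
--             features=[len(item) for item in features]
--     C=dict(Counter(features))
--     keys = sorted(C.keys())
--     DD = {}
--     for key in keys:
--         x = 0
--         for keykey in C.keys():
--             if keykey>=key:
--                 x+=C[keykey]
--         DD[key]=x
--     return DD
-- ===== SOURCE B (Python) =====
-- from collections import Counter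
--
-- def distribucion(D):
--     C = Counter(len(v) for v in D.values())
--     items = []
--     total = 0
--     for k in sorted(C, reverse=True):
--         total += C[k]
--         items.append((k, total))
--     return dict(reversed(items))
-- ===== Notes on version B (the rewrite author's own statement) =====
-- stated objective: faster
-- what changed: B counts feature-list lengths once with a Counter and does a single reverse-cumulative pass over the sorted keys, replacing A's useless double loop over keys and its quadratic per-key rescans of the Counter.
-- crash fix: On the empty dict A raises UnboundLocalError (features is never assigned); B returns the empty dict. — e.g. on distribucion([]): A raises UnboundLocalError, B returns []
import Mathlib
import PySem

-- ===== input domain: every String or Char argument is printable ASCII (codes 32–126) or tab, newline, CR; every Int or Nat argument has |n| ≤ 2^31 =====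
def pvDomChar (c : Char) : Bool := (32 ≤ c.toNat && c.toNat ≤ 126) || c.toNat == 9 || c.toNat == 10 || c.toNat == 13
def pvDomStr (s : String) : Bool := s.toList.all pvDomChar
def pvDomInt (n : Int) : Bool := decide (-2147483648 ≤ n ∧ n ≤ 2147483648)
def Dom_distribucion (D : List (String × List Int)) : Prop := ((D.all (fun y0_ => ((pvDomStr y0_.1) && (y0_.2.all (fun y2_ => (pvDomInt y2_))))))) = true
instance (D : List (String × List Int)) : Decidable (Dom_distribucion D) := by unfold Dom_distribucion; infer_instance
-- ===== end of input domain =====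

-- B replaces A's pointless double loop over keys and its per-key rescans of the Counter by
-- one Counter build plus a single reverse-cumulative pass over the sorted keys (faster).

-- ===== PORT A =====
-- A's D_rasgos dict is built and never read; it cannot affect the result and is omitted.
-- `features` is only assigned inside the nested loop, hence an Option here: on the empty
-- dict Python raises UnboundLocalError (those inputs are excluded by Pre_distribucion).
def distribucion (D : List (String × List Int)) : List (Int × Int) :=
  let d := PySem.Dict.ofList D
  let features? : Option (List Int) :=
    d.keys.foldl (fun acc _lengua =>
      d.keys.foldl (fun _acc2 _lengualengua =>
        let features := d.values
        some (features.map (fun item => PySem.List.len item))) acc) none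
  match features? with
  | none => []   -- UnboundLocalError in Python; outside Pre_distribucion
  | some features =>
    let C := PySem.Dict.counter features
    let keys := PySem.List.sorted C.keys (fun x => x) false
    let DD := keys.foldl (fun DD key =>
      let x := C.keys.foldl (fun x keykey =>
        if keykey ≥ key then x + C.getD keykey 0 else x) (0 : Int)
      DD.insert key x) (PySem.Dict.empty : PySem.Dict Int Int)
    DD.items

-- ===== PORT B =====
def distribucion_alt (D : List (String × List Int)) : List (Int × Int) :=
  let d := PySem.Dict.ofList D
  let C := PySem.Dict.counter (d.values.map (fun item => PySem.List.len item))
  let p := (PySem.List.sorted C.keys (fun x => x) true).foldl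
      (fun (p : List (Int × Int) × Int) k =>
        let total := p.2 + C.getD k 0
        (p.1 ++ [(k, total)], total)) ([], 0)
  p.1.reverse

-- ===== PRECONDITION & SPEC =====
-- A raises UnboundLocalError on the empty dict (features is never assigned); excluded.
def Pre_distribucion (D : List (String × List Int)) : Prop := D ≠ []
instance (D : List (String × List Int)) : Decidable (Pre_distribucion D) := by unfold Pre_distribucion; infer_instance
def pvWitness_distribucion : (List (String × List Int)) := [("a", [1, 2]), ("b", [3])]

-- On the empty dict A raises UnboundLocalError (features is never assigned); B returns the empty dict.
def Raises_distribucion (D : List (String × List Int)) : Prop := D = []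
instance (D : List (String × List Int)) : Decidable (Raises_distribucion D) := by unfold Raises_distribucion; infer_instance
def pvRaiseWitness_distribucion : (List (String × List Int)) := []
def pvRaiseWitnessOut_distribucion : List (Int × Int) := []

def Spec_distribucion (D : List (String × List Int)) (out : List (Int × Int)) : Prop := out = distribucion_alt D
instance (D : List (String × List Int)) (out : List (Int × Int)) : Decidable (Spec_distribucion D out) := by unfold Spec_distribucion; infer_instance

-- ===== CLAIM (what is proved, stated in full; the proofs are below) =====
def Claim_equal_distribucion : Prop := ∀ (D : List (String × List Int)), Dom_distribucion D → Pre_distribucion D → Spec_distribucion D (distribucion D)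
def Claim_raises_distribucion : Prop := (∀ (D : List (String × List Int)), Dom_distribucion D → Raises_distribucion D → ¬ Pre_distribucion D) ∧ (Dom_distribucion (pvRaiseWitness_distribucion) ∧ Raises_distribucion (pvRaiseWitness_distribucion) ∧ distribucion_alt (pvRaiseWitness_distribucion) = pvRaiseWitnessOut_distribucion)

-- ===== LEMMAS AND PROOFS =====

-- a fold that ignores its accumulator over a nonempty list is its constant
theorem pvFoldlConst {α β : Type} (c : β) : ∀ (l : List α) (a : β), l ≠ [] → l.foldl (fun _ _ => c) a = c := by
  intro l
  induction l with
  | nil => intro a h; exact absurd rfl h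
  | cons x xs ih =>
    intro a _
    simp only [List.foldl_cons]
    cases xs with
    | nil => rfl
    | cons y ys => exact ih _ (by simp)

theorem pvNestedConst {α β : Type} (c : β) (l : List α) (a : β) (h : l ≠ []) :
    l.foldl (fun acc _ => l.foldl (fun _ _ => c) acc) a = c := by
  have he : (fun (acc : β) (_ : α) => l.foldl (fun _ _ => c) acc) = fun _ _ => c := by
    funext acc y; exact pvFoldlConst c l acc h
  rw [he, pvFoldlConst c l a h]

-- the suffix weight: total f-weight of the elements of l that are ≥ k
def pvS (f : Int → Int) (l : List Int) (k : Int) : Int :=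
  ((l.filter (fun kk => kk ≥ k)).map f).sum

theorem pvFoldlGeSum (f : Int → Int) (k : Int) : ∀ (l : List Int) (x0 : Int),
    l.foldl (fun x kk => if kk ≥ k then x + f kk else x) x0 = x0 + pvS f l k := by
  intro l
  induction l with
  | nil => intro x0; simp [pvS]
  | cons a r ih =>
    intro x0
    simp only [List.foldl_cons, pvS, List.filter_cons]
    by_cases h : a ≥ k
    · simp only [h, if_pos, decide_true, ih, pvS]
      simp [add_assoc]
    · simp only [h, decide_false, ih, pvS]
      simp

-- the running-total scan of B, as a function
def pvScan (f : Int → Int) : Int → List Int → List (Int × Int)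
  | _, [] => []
  | t, k :: r => (k, t + f k) :: pvScan f (t + f k) r

theorem pvFoldlScan (f : Int → Int) : ∀ (ds : List Int) (acc : List (Int × Int)) (t : Int),
    ds.foldl (fun (p : List (Int × Int) × Int) k => (p.1 ++ [(k, p.2 + f k)], p.2 + f k)) (acc, t)
      = (acc ++ pvScan f t ds, t + (ds.map f).sum) := by
  intro ds
  induction ds with
  | nil => intro acc t; simp [pvScan]
  | cons k r ih =>
    intro acc t
    simp only [List.foldl_cons, ih, pvScan, List.map_cons, List.sum_cons]
    simp [add_assoc]

theorem pvScanAppend (f : Int → Int) : ∀ (l1 l2 : List Int) (t : Int),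
    pvScan f t (l1 ++ l2) = pvScan f t l1 ++ pvScan f (t + (l1.map f).sum) l2 := by
  intro l1
  induction l1 with
  | nil => intro l2 t; simp [pvScan]
  | cons k r ih =>
    intro l2 t
    simp only [List.cons_append, pvScan, ih, List.map_cons, List.sum_cons]
    rw [add_assoc]

theorem pvScanReverse (f : Int → Int) : ∀ (ks : List Int), ks.Pairwise (· < ·) → ∀ t,
    pvScan f t ks.reverse = (ks.map (fun k => (k, t + pvS f ks k))).reverse := by
  intro ks
  induction ks with
  | nil => intro _ t; simp [pvScan]
  | cons a r ih =>
    intro hp t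
    have ha : ∀ kk ∈ r, a < kk := fun kk hk => (List.pairwise_cons.mp hp).1 kk hk
    have hr : r.Pairwise (· < ·) := (List.pairwise_cons.mp hp).2
    simp only [List.reverse_cons, pvScanAppend, List.map_cons]
    rw [ih hr t]
    have h1 : pvS f (a :: r) a = f a + (r.map f).sum := by
      have : r.filter (fun kk => kk ≥ a) = r :=
        List.filter_eq_self.mpr (fun kk hk => by simpa using le_of_lt (ha kk hk))
      simp [pvS, this]
    have h2 : ∀ kk ∈ r, pvS f (a :: r) kk = pvS f r kk := by
      intro kk hk
      have : ¬ (a ≥ kk) := not_le.mpr (ha kk hk)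
      simp [pvS, this]
    have h3 : r.map (fun k => (k, t + pvS f (a :: r) k)) = r.map (fun k => (k, t + pvS f r k)) :=
      List.map_congr_left (fun kk hk => by rw [h2 kk hk])
    rw [h3]
    simp [pvScan, h1, List.sum_reverse, add_comm, add_left_comm]

-- keys of the dict built from a nonempty list are nonempty
theorem pvKeysNeNil (D : List (String × List Int)) (h : D ≠ []) :
    (PySem.Dict.ofList D).keys ≠ [] := by
  cases D with
  | nil => exact absurd rfl h
  | cons p rest =>
    have hk : (PySem.Dict.ofList (p :: rest)).keys
        = PySem.Set.update (PySem.Dict.empty : PySem.Dict String (List Int)).keys ((p :: rest).map Prod.fst) :=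
      PySem.Dict.keys_foldl_insert_key (p :: rest) Prod.fst (fun _ q => q.2) PySem.Dict.empty
    have hm : p.1 ∈ (PySem.Dict.ofList (p :: rest)).keys := by
      rw [hk]
      exact (PySem.Set.mem_update _ _ _).mpr (Or.inr (by simp))
    exact List.ne_nil_of_mem hm

-- both loops over the sorted keys produce the sorted keys paired with their suffix weights
theorem pvCore (C : PySem.Dict Int Int)
    (hlt : (PySem.List.sorted C.keys (fun x => x) false).Pairwise (· < ·)) :
    ((PySem.List.sorted C.keys (fun x => x) false).foldl (fun DD key =>
        DD.insert key (C.keys.foldl (fun x keykey =>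
          if keykey ≥ key then x + C.getD keykey 0 else x) (0 : Int)))
      (PySem.Dict.empty : PySem.Dict Int Int)).items
    = (((PySem.List.sorted C.keys (fun x => x) true).foldl
        (fun (p : List (Int × Int) × Int) k => (p.1 ++ [(k, p.2 + C.getD k 0)], p.2 + C.getD k 0))
        ([], 0)).1).reverse := by
  have hperm : (PySem.List.sorted C.keys (fun x => x) false).Perm C.keys :=
    PySem.List.sorted_perm C.keys (fun x => x) false
  have hnd : (PySem.List.sorted C.keys (fun x => x) false).Nodup :=
    hlt.imp (fun h => ne_of_lt h)
  have hrev : PySem.List.sorted C.keys (fun x => x) true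
      = (PySem.List.sorted C.keys (fun x => x) false).reverse := by
    apply PySem.List.sorted_rev_eq_of_perm_of_pairwise_gt
    · exact (List.reverse_perm _).trans hperm
    · simpa [List.pairwise_reverse] using hlt
  rw [hrev, pvFoldlScan (fun kk => C.getD kk 0),
    PySem.Dict.items_foldl_insert_fresh (PySem.List.sorted C.keys (fun x => x) false)
      (fun a => a)
      (fun key => C.keys.foldl (fun x keykey =>
        if keykey ≥ key then x + C.getD keykey 0 else x) (0 : Int))
      PySem.Dict.empty
      (fun a _ => PySem.Dict.contains_empty a)
      (by simpa using hnd)]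
  simp only [List.nil_append, pvScanReverse (fun kk => C.getD kk 0) _ hlt 0,
    List.reverse_reverse]
  have hempty : (PySem.Dict.empty : PySem.Dict Int Int).items = [] := rfl
  rw [hempty, List.nil_append]
  apply List.map_congr_left
  intro k _
  rw [pvFoldlGeSum (fun kk => C.getD kk 0) k C.keys 0, zero_add, zero_add]
  have : pvS (fun kk => C.getD kk 0) C.keys k
      = pvS (fun kk => C.getD kk 0) (PySem.List.sorted C.keys (fun x => x) false) k := by
    unfold pvS
    exact (List.Perm.sum_eq ((hperm.filter _).map _)).symm
  rw [this]

-- the common characterisation: the two ports agree on every nonempty input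
theorem pvMain (D : List (String × List Int)) (h : D ≠ []) :
    distribucion D = distribucion_alt D := by
  have hk := pvKeysNeNil D h
  simp only [distribucion, distribucion_alt]
  rw [pvNestedConst (some ((PySem.Dict.ofList D).values.map (fun item => PySem.List.len item)))
    (PySem.Dict.ofList D).keys none hk]
  exact pvCore (PySem.Dict.counter ((PySem.Dict.ofList D).values.map (fun item => PySem.List.len item)))
    (by rw [PySem.Dict.keys_counter]; exact PySem.List.sorted_ofList_pairwise_lt _)

-- ===== VERDICT (by name: the statement is the Claim_ definition above) =====
theorem distribucion_spec : Claim_equal_distribucion := by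
  intro D _ hpre
  unfold Spec_distribucion
  exact pvMain D hpre

@[simp] theorem distribucion_raises : Claim_raises_distribucion := by
  unfold Claim_raises_distribucion
  constructor
  · intro D _ hr hp; exact hp hr
  · exact ⟨by decide, by decide, by decide⟩
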